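-- pv_equiv track=rewrite | github.com/pypi-data/pypi-mirror-118 | packages/brainstorm-search/brainstorm-search-0.0.1.tar.gz/brainstorm-search-0.0.1/brainstorm_search/helper.py | keep_only_start_with_number
-- ===== SOURCE A (Python) =====
-- def keep_only_start_with_number(idea_candidates):
-- 	result = []
-- 	for idea in idea_candidates:
-- 		num_seen = False
-- 		letter_seen = False
--
-- 		for ch in idea:
-- 			if ch.isdigit():
-- 				num_seen = True
-- 			elif ch.isalpha():
-- 				letter_seen = True
--
-- 			if num_seen and not letter_seen:
-- 				result.append(idea)
-- 				break
--
-- 	return result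
-- ===== SOURCE B (Python) =====
-- def _first_index(s, pred):
--     for i, ch in enumerate(s):
--         if pred(ch):
--             return i
--     return -1
--
-- def keep_only_start_with_number(idea_candidates):
--     result = []
--     for idea in idea_candidates:
--         d = _first_index(idea, str.isdigit)
--         l = _first_index(idea, str.isalpha)
--         if d != -1 and (l == -1 or d < l):
--             result.append(idea)
--     return result
-- ===== Notes on version B (the rewrite author's own statement) =====
-- stated objective: alternative
-- what changed: Replaces A's stateful single scan (num_seen/letter_seen flags with append/break inside the char loop) by two independent searches per string - the index of the first digit and the index of the first letter - and keeps the string iff a digit exists and its index precedes any letter's; correct because A appends exactly when a digit is reached before any letter.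
import Mathlib
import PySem

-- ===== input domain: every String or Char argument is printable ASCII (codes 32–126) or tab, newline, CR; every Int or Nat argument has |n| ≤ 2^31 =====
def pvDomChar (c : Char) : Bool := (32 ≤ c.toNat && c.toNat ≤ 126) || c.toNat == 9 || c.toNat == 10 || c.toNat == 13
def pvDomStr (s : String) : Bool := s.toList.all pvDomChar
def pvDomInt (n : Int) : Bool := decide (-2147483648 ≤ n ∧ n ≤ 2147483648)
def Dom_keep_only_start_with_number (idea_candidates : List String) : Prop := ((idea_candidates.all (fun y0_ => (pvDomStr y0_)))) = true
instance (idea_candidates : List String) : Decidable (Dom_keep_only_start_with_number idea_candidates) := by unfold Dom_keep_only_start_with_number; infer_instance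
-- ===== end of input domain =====

-- B replaces A's stateful flag-scan by two independent first-index searches
-- (first digit index vs first letter index) compared afterwards; same cost, different shape.


-- ===== PORT A =====
-- inner for-loop over the chars of one idea: state (num_seen, letter_seen); returns true iff it appended
def pvAInner : List Char → Bool → Bool → Bool
  | [], _, _ => false
  | ch :: rest, num_seen, letter_seen =>
    let num_seen' := if PySem.Chars.isdigit ch then true else num_seen
    let letter_seen' := if PySem.Chars.isdigit ch then letter_seen
      else if PySem.Chars.isalpha ch then true else letter_seen
    if num_seen' && !letter_seen' then true else pvAInner rest num_seen' letter_seen'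

def keep_only_start_with_number (idea_candidates : List String) : List String :=
  idea_candidates.foldl (fun result idea =>
    if pvAInner idea.toList false false then result ++ [idea] else result) []

-- ===== PORT B =====
-- _first_index: enumerate-style scan returning the index of the first char satisfying pred, -1 if none
def pvFirstIndex (pred : Char → Bool) : List Char → Int → Int
  | [], _ => -1
  | ch :: rest, i => if pred ch then i else pvFirstIndex pred rest (i + 1)

def keep_only_start_with_number_alt (idea_candidates : List String) : List String :=
  idea_candidates.foldl (fun result idea =>
    let d := pvFirstIndex PySem.Chars.isdigit idea.toList 0
    let l := pvFirstIndex PySem.Chars.isalpha idea.toList 0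
    if d ≠ -1 ∧ (l = -1 ∨ d < l) then result ++ [idea] else result) []

-- ===== PRECONDITION & SPEC =====
def Spec_keep_only_start_with_number (idea_candidates : List String) (out : List String) : Prop := out = keep_only_start_with_number_alt idea_candidates
instance (idea_candidates : List String) (out : List String) : Decidable (Spec_keep_only_start_with_number idea_candidates out) := by unfold Spec_keep_only_start_with_number; infer_instance

-- ===== CLAIM (what is proved, stated in full; the proofs are below) =====
def Claim_equal_keep_only_start_with_number : Prop := ∀ (idea_candidates : List String), Dom_keep_only_start_with_number idea_candidates → Spec_keep_only_start_with_number idea_candidates (keep_only_start_with_number idea_candidates)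

-- ===== LEMMAS AND PROOFS =====

-- a digit is never a letter
lemma pv_digit_not_alpha (c : Char) (h : PySem.Chars.isdigit c = true) :
    PySem.Chars.isalpha c = false := by
  simp only [PySem.Chars.isdigit, PySem.Chars.isalpha, PySem.Chars.isupper, PySem.Chars.islower,
    Bool.and_eq_true, Bool.or_eq_false_iff, Bool.and_eq_false_iff, decide_eq_true_eq,
    decide_eq_false_iff_not, Char.le_def] at *
  obtain ⟨h1, h2⟩ := h
  simp only [UInt32.le_iff_toNat_le] at *
  have e0 : ('0' : Char).val.toNat = 48 := rfl
  have e9 : ('9' : Char).val.toNat = 57 := rfl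
  have eA : ('A' : Char).val.toNat = 65 := rfl
  have ea : ('a' : Char).val.toNat = 97 := rfl
  constructor <;> left <;> omega

-- intermediate form of the kept-test, on findIdx? options
def pvCond (cs : List Char) : Bool :=
  match cs.findIdx? PySem.Chars.isdigit, cs.findIdx? PySem.Chars.isalpha with
  | none, _ => false
  | some _, none => true
  | some n, some m => decide (n < m)

-- pvFirstIndex in terms of findIdx?
lemma pvFirstIndex_eq (pred : Char → Bool) (cs : List Char) (i : Int) :
    pvFirstIndex pred cs i = match cs.findIdx? pred with
      | some n => i + n
      | none => -1 := by
  induction cs generalizing i with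
  | nil => rfl
  | cons c rest ih =>
    by_cases h : pred c
    · simp [pvFirstIndex, h, List.findIdx?_cons]
    · rw [pvFirstIndex, if_neg (by simp [h]), ih (i + 1)]
      simp only [List.findIdx?_cons, h]
      cases rest.findIdx? pred with
      | none => simp
      | some n => simp; ring

-- B's index comparison decides pvCond
lemma pvCond_iff (cs : List Char) :
    (pvFirstIndex PySem.Chars.isdigit cs 0 ≠ -1 ∧
       (pvFirstIndex PySem.Chars.isalpha cs 0 = -1 ∨
        pvFirstIndex PySem.Chars.isdigit cs 0 < pvFirstIndex PySem.Chars.isalpha cs 0))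
      ↔ pvCond cs = true := by
  rw [pvFirstIndex_eq, pvFirstIndex_eq]
  unfold pvCond
  cases cs.findIdx? PySem.Chars.isdigit with
  | none => simp
  | some n =>
    cases cs.findIdx? PySem.Chars.isalpha with
    | none => simp
    | some m => simp

-- once a letter has been seen (letter_seen = true) A's inner loop never appends
lemma pvAInner_letter (cs : List Char) : ∀ num, pvAInner cs num true = false := by
  induction cs with
  | nil => intro num; rfl
  | cons c rest ih =>
    intro num
    simp only [pvAInner]
    split_ifs <;> cases num <;> simp_all

-- A's inner loop decides exactly pvCond
lemma pvAInner_eq_cond (cs : List Char) : pvAInner cs false false = pvCond cs := by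
  induction cs with
  | nil => rfl
  | cons c rest ih =>
    by_cases hd : PySem.Chars.isdigit c
    · have ha := pv_digit_not_alpha c hd
      simp only [pvAInner, pvCond, hd, ha, List.findIdx?_cons, if_true]
      cases rest.findIdx? PySem.Chars.isalpha with
      | none => simp
      | some m => simp
    · by_cases ha : PySem.Chars.isalpha c
      · simp [pvAInner, pvCond, hd, ha, List.findIdx?_cons, pvAInner_letter]
        cases rest.findIdx? PySem.Chars.isdigit with
        | none => simp
        | some n => simp
      · simp only [pvAInner, pvCond, hd, ha, List.findIdx?_cons]
        norm_num
        rw [ih]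
        unfold pvCond
        cases rest.findIdx? PySem.Chars.isdigit with
        | none => simp
        | some n =>
          cases rest.findIdx? PySem.Chars.isalpha with
          | none => simp
          | some m => simp

-- one step of B's fold equals one step of A's fold
lemma pvStep_eq (r : List String) (idea : String) :
    (let d := pvFirstIndex PySem.Chars.isdigit idea.toList 0
     let l := pvFirstIndex PySem.Chars.isalpha idea.toList 0
     if d ≠ -1 ∧ (l = -1 ∨ d < l) then r ++ [idea] else r)
      = if pvAInner idea.toList false false then r ++ [idea] else r := by
  show (if (pvFirstIndex PySem.Chars.isdigit idea.toList 0 ≠ -1 ∧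
       (pvFirstIndex PySem.Chars.isalpha idea.toList 0 = -1 ∨
        pvFirstIndex PySem.Chars.isdigit idea.toList 0 < pvFirstIndex PySem.Chars.isalpha idea.toList 0))
      then r ++ [idea] else r) = _
  rw [pvAInner_eq_cond]
  by_cases hp : (pvFirstIndex PySem.Chars.isdigit idea.toList 0 ≠ -1 ∧
      (pvFirstIndex PySem.Chars.isalpha idea.toList 0 = -1 ∨
       pvFirstIndex PySem.Chars.isdigit idea.toList 0 < pvFirstIndex PySem.Chars.isalpha idea.toList 0))
  · rw [if_pos hp, if_pos ((pvCond_iff _).mp hp)]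
  · rw [if_neg hp, if_neg (fun hc => hp ((pvCond_iff _).mpr hc))]

-- the two folds agree step by step
lemma pvFoldl_eq (xs : List String) (acc : List String) :
    xs.foldl (fun result idea => if pvAInner idea.toList false false then result ++ [idea] else result) acc
      = xs.foldl (fun result idea =>
          let d := pvFirstIndex PySem.Chars.isdigit idea.toList 0
          let l := pvFirstIndex PySem.Chars.isalpha idea.toList 0
          if d ≠ -1 ∧ (l = -1 ∨ d < l) then result ++ [idea] else result) acc := by
  induction xs generalizing acc with
  | nil => rfl
  | cons x rest ih =>
    simp only [List.foldl]
    rw [pvStep_eq acc x]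
    exact ih _

-- ===== VERDICT (by name: the statement is the Claim_ definition above) =====
theorem keep_only_start_with_number_spec : Claim_equal_keep_only_start_with_number := by
  intro xs _
  show keep_only_start_with_number xs = keep_only_start_with_number_alt xs
  unfold keep_only_start_with_number keep_only_start_with_number_alt
  exact pvFoldl_eq xs []
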